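-- pv_equiv track=rewrite | github.com/Jazzhsu/bitburner | go/ai/common_test.py | parse_ascii_board
-- ===== SOURCE A (Python) =====
-- from typing import Set, List
--
-- def parse_ascii_board(ascii_board: str) -> tuple[List[tuple], List[tuple], List[tuple]]:
--     """
--     Parse ASCII art board representation into coordinates.
--
--     Symbols:
--     . = empty
--     # = wall
--     X = black stone
--     O = white stone
--
--     Returns: (wall_points, black_stones, white_stones)
--     """
--     lines = [line.strip() for line in ascii_board.strip().split('\n') if line.strip()]
--     wall_points = []
--     black_stones = []
--     white_stones = []
--
--     for row_idx, line in enumerate(lines):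
--         for col_idx, char in enumerate(line):
--             # Convert to 1-indexed coordinates (Go board convention)
--             row = row_idx + 1
--             col = col_idx + 1
--
--             if char == '#':
--                 wall_points.append((row, col))
--             elif char == 'X':
--                 black_stones.append((row, col))
--             elif char == 'O':
--                 white_stones.append((row, col))
--             # '.' represents empty space, no action needed
--
--     return wall_points, black_stones, white_stones
-- ===== SOURCE B (Python) =====
-- def parse_ascii_board(ascii_board: str):
--     """Parse ASCII art board into (wall_points, black_stones, white_stones).
--
--     Decomposition: first flatten the board into one enumerated cell list,
--     then derive each output with its own filtered comprehension.
--     """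
--     lines = [line.strip() for line in ascii_board.strip().split('\n') if line.strip()]
--     cells = [(r + 1, c + 1, ch) for r, line in enumerate(lines) for c, ch in enumerate(line)]
--     wall_points = [(r, c) for r, c, ch in cells if ch == '#']
--     black_stones = [(r, c) for r, c, ch in cells if ch == 'X']
--     white_stones = [(r, c) for r, c, ch in cells if ch == 'O']
--     return wall_points, black_stones, white_stones
-- ===== Notes on version B (the rewrite author's own statement) =====
-- stated objective: alternative
-- what changed: A classifies each character in one nested loop with three accumulators; B first flattens the board into one enumerated cell list and then derives each of the three outputs with its own filtered comprehension.
import Mathlib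
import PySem

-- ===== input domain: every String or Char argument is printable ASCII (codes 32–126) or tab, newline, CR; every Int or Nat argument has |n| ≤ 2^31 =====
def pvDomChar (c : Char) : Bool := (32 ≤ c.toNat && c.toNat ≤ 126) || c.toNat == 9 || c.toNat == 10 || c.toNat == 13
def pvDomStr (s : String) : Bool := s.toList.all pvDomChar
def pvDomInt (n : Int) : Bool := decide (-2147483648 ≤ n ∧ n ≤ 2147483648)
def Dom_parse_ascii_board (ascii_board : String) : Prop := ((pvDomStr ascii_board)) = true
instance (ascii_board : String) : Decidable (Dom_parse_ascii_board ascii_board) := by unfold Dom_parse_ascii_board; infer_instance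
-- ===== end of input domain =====

-- B replaces A's single classifying nested loop by a flat enumerated cell list plus three filtered passes (alternative decomposition).

-- ===== PORT A =====
-- lines = [line.strip() for line in ascii_board.strip().split('\n') if line.strip()]
def pvLinesA (ascii_board : String) : List String :=
  (((PySem.Str.split? (PySem.Str.strip ascii_board) "\n").getD []).filter
      (fun line => PySem.Str.strip line ≠ "")).map PySem.Str.strip

def parse_ascii_board (ascii_board : String) : (List (Int × Int)) × (List (Int × Int)) × (List (Int × Int)) :=
  let lines := pvLinesA ascii_board
  -- nested for-loops over enumerate, appending to the three accumulators
  let st := (PySem.List.enumerate lines 0).foldl (fun st rl =>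
    (PySem.List.enumerate rl.2.toList 0).foldl (fun st p =>
      let row : Int := rl.1 + 1
      let col : Int := p.1 + 1
      if p.2 = '#' then (st.1 ++ [(row, col)], st.2.1, st.2.2)
      else if p.2 = 'X' then (st.1, st.2.1 ++ [(row, col)], st.2.2)
      else if p.2 = 'O' then (st.1, st.2.1, st.2.2 ++ [(row, col)])
      else st) st) (([], [], []) : (List (Int × Int)) × (List (Int × Int)) × (List (Int × Int)))
  st

-- ===== PORT B =====
def pvLinesB (ascii_board : String) : List String :=
  (((PySem.Str.split? (PySem.Str.strip ascii_board) "\n").getD []).filter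
      (fun line => PySem.Str.strip line ≠ "")).map PySem.Str.strip

-- cells = [(r+1, c+1, ch) for r, line in enumerate(lines) for c, ch in enumerate(line)]
def pvCells (ascii_board : String) : List (Int × Int × Char) :=
  (PySem.List.enumerate (pvLinesB ascii_board) 0).flatMap (fun rl =>
    (PySem.List.enumerate rl.2.toList 0).map (fun p => (rl.1 + 1, p.1 + 1, p.2)))

def pvPick (cells : List (Int × Int × Char)) (ch : Char) : List (Int × Int) :=
  (cells.filter (fun t => t.2.2 = ch)).map (fun t => (t.1, t.2.1))

def parse_ascii_board_alt (ascii_board : String) : (List (Int × Int)) × (List (Int × Int)) × (List (Int × Int)) :=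
  let cells := pvCells ascii_board
  (pvPick cells '#', pvPick cells 'X', pvPick cells 'O')

-- ===== PRECONDITION & SPEC =====
def Spec_parse_ascii_board (ascii_board : String) (out : (List (Int × Int)) × (List (Int × Int)) × (List (Int × Int))) : Prop := out = parse_ascii_board_alt ascii_board
instance (ascii_board : String) (out : (List (Int × Int)) × (List (Int × Int)) × (List (Int × Int))) : Decidable (Spec_parse_ascii_board ascii_board out) := by unfold Spec_parse_ascii_board; infer_instance

-- ===== CLAIM (what is proved, stated in full; the proofs are below) =====
def Claim_equal_parse_ascii_board : Prop := ∀ (ascii_board : String), Dom_parse_ascii_board ascii_board → Spec_parse_ascii_board ascii_board (parse_ascii_board ascii_board)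

-- ===== LEMMAS AND PROOFS =====

-- the classifying step of A, on a flattened cell
def pvStep (st : (List (Int × Int)) × (List (Int × Int)) × (List (Int × Int)))
    (t : Int × Int × Char) : (List (Int × Int)) × (List (Int × Int)) × (List (Int × Int)) :=
  if t.2.2 = '#' then (st.1 ++ [(t.1, t.2.1)], st.2.1, st.2.2)
  else if t.2.2 = 'X' then (st.1, st.2.1 ++ [(t.1, t.2.1)], st.2.2)
  else if t.2.2 = 'O' then (st.1, st.2.1, st.2.2 ++ [(t.1, t.2.1)])
  else st

lemma foldl_pvStep (cells : List (Int × Int × Char)) (st : (List (Int × Int)) × (List (Int × Int)) × (List (Int × Int))) :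
    cells.foldl pvStep st = (st.1 ++ pvPick cells '#', st.2.1 ++ pvPick cells 'X', st.2.2 ++ pvPick cells 'O') := by
  induction cells generalizing st with
  | nil => simp [pvPick]
  | cons t rest ih =>
    simp only [List.foldl_cons, ih, pvStep, pvPick]
    by_cases h1 : t.2.2 = '#' <;> by_cases h2 : t.2.2 = 'X' <;> by_cases h3 : t.2.2 = 'O' <;>
      simp_all

lemma parse_eq_foldl_cells (ascii_board : String) :
    parse_ascii_board ascii_board = (pvCells ascii_board).foldl pvStep ([], [], []) := by
  unfold parse_ascii_board pvCells pvLinesA pvLinesB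
  rw [List.foldl_flatMap]
  refine List.foldl_ext _ _ _ (fun rl _ st => ?_)
  rw [List.foldl_map]
  rfl

theorem parse_ascii_board_spec_aux (ascii_board : String) :
    parse_ascii_board ascii_board = parse_ascii_board_alt ascii_board := by
  rw [parse_eq_foldl_cells, foldl_pvStep]
  simp [parse_ascii_board_alt]

-- ===== VERDICT (by name: the statement is the Claim_ definition above) =====
theorem parse_ascii_board_spec : Claim_equal_parse_ascii_board := by
  intro s _
  exact (parse_ascii_board_spec_aux s).symm ▸ rfl
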